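-- pv_equiv track=rewrite | github.com/LoveEklund/drawing_guesser | app.py | string_overlap
-- ===== SOURCE A (Python) =====
-- def string_overlap(target, strings):
--     result = ''
--
--     for i in range(len(target)):
--         overlap = False
--
--         for s in strings:
--             if i < len(s) and s[i] == target[i]:
--                 overlap = True
--                 result += target[i]
--                 break
--
--         if not overlap:
--             result += '_'
--
--     return result
-- ===== SOURCE B (Python) =====
-- def string_overlap(target, strings):
--     matched = set()
--     for s in strings:
--         for i, c in enumerate(s):
--             if i < len(target) and c == target[i]:
--                 matched.add(i)
--     return ''.join(target[i] if i in matched else '_' for i in range(len(target)))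
-- ===== Notes on version B (the rewrite author's own statement) =====
-- stated objective: faster
-- what changed: Inverts the loop nesting: instead of scanning all strings at every target position with an early break, B makes one pass over the strings building a set of matched indices and then emits the result in a second pass over the target.
import Mathlib
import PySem

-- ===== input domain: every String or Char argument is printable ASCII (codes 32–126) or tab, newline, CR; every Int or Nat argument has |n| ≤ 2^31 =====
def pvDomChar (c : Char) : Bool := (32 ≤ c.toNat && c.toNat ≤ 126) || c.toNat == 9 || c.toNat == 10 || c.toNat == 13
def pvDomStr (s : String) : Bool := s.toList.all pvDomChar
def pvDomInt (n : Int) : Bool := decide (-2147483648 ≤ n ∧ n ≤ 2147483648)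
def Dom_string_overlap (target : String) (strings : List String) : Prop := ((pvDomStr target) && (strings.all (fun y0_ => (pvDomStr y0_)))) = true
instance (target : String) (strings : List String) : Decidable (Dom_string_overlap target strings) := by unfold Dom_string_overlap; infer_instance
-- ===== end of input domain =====

-- B builds the set of matched indices in one pass over the strings, then emits the result; same value as A.

-- ===== PORT A =====
-- inner loop of A: scan the strings, stop (True) at the first s with i < len(s) and s[i] == target[i]
def soFind (tl : List Char) (i : Nat) (ss : List (List Char)) : Bool :=
  match ss with
  | [] => false
  | s :: rest =>
      if i < s.length ∧ s.getD i ' ' = tl.getD i ' ' then true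
      else soFind tl i rest

def string_overlap (target : String) (strings : List String) : String :=
  let tl := target.toList
  String.ofList ((List.range tl.length).foldl (fun result i =>
    if soFind tl i (strings.map String.toList) then result ++ [tl.getD i ' ']
    else result ++ ['_']) [])

-- ===== PORT B =====
def string_overlap_alt (target : String) (strings : List String) : String :=
  let tl := target.toList
  let matched : PySem.Set Int := strings.foldl (fun acc s =>
      (PySem.List.enumerate s.toList 0).foldl (fun acc2 p =>
        if p.1 < (tl.length : Int) ∧ p.2 = PySem.List.pyGetD tl p.1 ' '
        then PySem.Set.add acc2 p.1 else acc2) acc)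
    PySem.Set.empty
  String.ofList ((List.range tl.length).map (fun (i : Nat) =>
    if PySem.Set.contains matched (i : Int) then tl.getD i ' ' else '_'))

-- ===== PRECONDITION & SPEC =====
def Spec_string_overlap (target : String) (strings : List String) (out : String) : Prop := out = string_overlap_alt target strings
instance (target : String) (strings : List String) (out : String) : Decidable (Spec_string_overlap target strings out) := by unfold Spec_string_overlap; infer_instance

-- ===== CLAIM (what is proved, stated in full; the proofs are below) =====
def Claim_equal_string_overlap : Prop := ∀ (target : String) (strings : List String), Dom_string_overlap target strings → Spec_string_overlap target strings (string_overlap target strings)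

-- ===== LEMMAS AND PROOFS =====

-- membership after a fold that conditionally adds f p for each p of l
theorem mem_foldl_add_if {α β : Type} [BEq α] [LawfulBEq α]
    (l : List β) (cond : β → Prop) [DecidablePred cond] (f : β → α)
    (acc : PySem.Set α) (j : α) :
    j ∈ l.foldl (fun a p => if cond p then PySem.Set.add a (f p) else a) acc ↔
      j ∈ acc ∨ ∃ p ∈ l, cond p ∧ f p = j := by
  induction l generalizing acc with
  | nil => simp
  | cons x xs ih =>
      simp only [List.foldl_cons, ih]
      by_cases hx : cond x
      · simp [hx, PySem.Set.mem_add]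
        tauto
      · simp [hx]

-- membership in B's matched set
theorem mem_matched (tl : List Char) (strings : List String)
    (init : PySem.Set Int) (j : Int) :
    j ∈ strings.foldl (fun acc s =>
      (PySem.List.enumerate s.toList 0).foldl (fun acc2 p =>
        if p.1 < (tl.length : Int) ∧ p.2 = PySem.List.pyGetD tl p.1 ' '
        then PySem.Set.add acc2 p.1 else acc2) acc) init ↔
    j ∈ init ∨ ∃ s ∈ strings, ∃ p ∈ PySem.List.enumerate s.toList 0,
      (p.1 < (tl.length : Int) ∧ p.2 = PySem.List.pyGetD tl p.1 ' ') ∧ p.1 = j := by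
  induction strings generalizing init with
  | nil => simp
  | cons s rest ih =>
      simp only [List.foldl_cons, ih,
        mem_foldl_add_if (PySem.List.enumerate s.toList 0)
          (fun p => p.1 < (tl.length : Int) ∧ p.2 = PySem.List.pyGetD tl p.1 ' ')
          (fun p => p.1) init j]
      constructor
      · rintro (( h | h) | h)
        · exact Or.inl h
        · exact Or.inr ⟨s, by simp, h⟩
        · obtain ⟨t, ht, hp⟩ := h
          exact Or.inr ⟨t, by simp [ht], hp⟩
      · rintro (h | ⟨t, ht, hp⟩)
        · exact Or.inl (Or.inl h)
        · rcases List.mem_cons.mp ht with rfl | ht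
          · exact Or.inl (Or.inr hp)
          · exact Or.inr ⟨t, ht, hp⟩

-- A's inner scan succeeds iff some string matches at i
theorem soFind_iff (tl : List Char) (i : Nat) (ss : List (List Char)) :
    soFind tl i ss = true ↔ ∃ s ∈ ss, i < s.length ∧ s.getD i ' ' = tl.getD i ' ' := by
  induction ss with
  | nil => simp [soFind]
  | cons s rest ih =>
      by_cases h : i < s.length ∧ s.getD i ' ' = tl.getD i ' '
      · constructor
        · intro _; exact ⟨s, by simp, h⟩
        · intro _; rw [soFind, if_pos h]
      · constructor
        · intro hf
          rw [soFind, if_neg h] at hf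
          obtain ⟨t, ht, hp⟩ := ih.mp hf
          exact ⟨t, List.mem_cons_of_mem _ ht, hp⟩
        · rintro ⟨t, ht, hp⟩
          rcases List.mem_cons.mp ht with rfl | ht
          · exact absurd hp h
          · rw [soFind, if_neg h]; exact ih.mpr ⟨t, ht, hp⟩

-- the two conditions agree at every position i < len(target)
theorem cond_eq (tl : List Char) (strings : List String) (i : Nat) (hi : i < tl.length) :
    soFind tl i (strings.map String.toList) =
    PySem.Set.contains (strings.foldl (fun acc s =>
      (PySem.List.enumerate s.toList 0).foldl (fun acc2 p =>
        if p.1 < (tl.length : Int) ∧ p.2 = PySem.List.pyGetD tl p.1 ' '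
        then PySem.Set.add acc2 p.1 else acc2) acc) PySem.Set.empty) (i : Int) := by
  apply Bool.eq_iff_iff.mpr
  rw [soFind_iff, PySem.Set.contains_iff, mem_matched]
  constructor
  · rintro ⟨s, hs, hlen, hmatch⟩
    rcases List.mem_map.mp hs with ⟨t, ht, rfl⟩
    refine Or.inr ⟨t, ht, ((i : Int), t.toList[i]'hlen),
      (PySem.List.mem_enumerate_iff _ _ _).mpr ⟨i, hlen, by simp⟩,
      ⟨show (i:Int) < (tl.length:Int) from by exact_mod_cast hi, ?_⟩, rfl⟩
    rw [PySem.List.pyGetD_natCast]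
    rw [List.getD_eq_getElem _ _ hlen] at hmatch
    exact hmatch
  · rintro (h0 | ⟨t, ht, p, hp, ⟨hlt, hmatch⟩, hpi⟩)
    · simp [PySem.Set.empty] at h0
    · rcases (PySem.List.mem_enumerate_iff _ _ _).mp hp with ⟨k, hk, rfl⟩
      simp only [zero_add] at hpi hmatch
      have hki : k = i := by exact_mod_cast hpi
      subst hki
      refine ⟨t.toList, List.mem_map.mpr ⟨t, ht, rfl⟩, hk, ?_⟩
      rw [PySem.List.pyGetD_natCast] at hmatch
      rw [List.getD_eq_getElem _ _ hk]
      exact hmatch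

-- ===== VERDICT (by name: the statement is the Claim_ definition above) =====
theorem string_overlap_spec : Claim_equal_string_overlap := by
  intro target strings _
  unfold Spec_string_overlap string_overlap string_overlap_alt
  have hfun : ∀ (r : List Char) (i : Nat),
      (if soFind target.toList i (strings.map String.toList)
        then r ++ [target.toList.getD i ' '] else r ++ ['_'])
      = r ++ [if soFind target.toList i (strings.map String.toList)
          then target.toList.getD i ' ' else '_'] := by
    intro r i; split <;> rfl
  simp only [hfun, PySem.List.foldl_append_singleton_eq_map, List.nil_append]
  congr 1
  apply List.map_congr_left
  intro i hi
  rw [cond_eq target.toList strings i (List.mem_range.mp hi)]
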